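-- pv_equiv track=rewrite | github.com/IRIS-ROBERTO/ai-office-system | backend/core/delivery_ledger.py | _delivery_class
-- ===== SOURCE A (Python) =====
-- from typing import Any
--
-- def _delivery_class(item: dict[str, Any]) -> str:
--     files = {str(path).replace("\\", "/").lower() for path in item.get("files_changed") or []}
--     if {"index.html", "src/app.js", "src/styles.css"}.issubset(files):
--         return "static_web_app"
--     if any(path.startswith("security/") for path in files):
--         return "security_or_complex_slice"
--     if any(path.startswith("tests/") for path in files):
--         return "qa_validation"
--     if any(path.startswith("docs/") for path in files):
--         return "documented_delivery"
--     return "general_delivery"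
-- ===== SOURCE B (Python) =====
-- def _delivery_class(item):
--     # Rank-minimization: each path gets a severity rank (security=1 < tests=2 < docs=3 < other=4);
--     # one pass keeps the minimum rank and shrinks the set of web files still needed.
--     labels = {1: "security_or_complex_slice", 2: "qa_validation", 3: "documented_delivery"}
--     best = 4
--     need = {"index.html", "src/app.js", "src/styles.css"}
--     for p in (item.get("files_changed") or []):
--         q = str(p).replace("\\", "/").lower()
--         need.discard(q)
--         if q.startswith("security/"):
--             r = 1
--         elif q.startswith("tests/"):
--             r = 2
--         elif q.startswith("docs/"):
--             r = 3
--         else: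
--             r = 4
--         best = min(best, r)
--     if not need:
--         return "static_web_app"
--     return labels.get(best, "general_delivery")
-- ===== Notes on version B (the rewrite author's own statement) =====
-- stated objective: alternative
-- what changed: B replaces A's prioritized chain of set-membership/any() scans by a single-pass rank-minimization: each path is mapped to a severity rank whose running minimum is kept, a 'need' set of the three web files is shrunk by discard as paths are seen, and the answer is read off the minimum rank via a label table (static_web_app when the need set is empty).
import Mathlib
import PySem

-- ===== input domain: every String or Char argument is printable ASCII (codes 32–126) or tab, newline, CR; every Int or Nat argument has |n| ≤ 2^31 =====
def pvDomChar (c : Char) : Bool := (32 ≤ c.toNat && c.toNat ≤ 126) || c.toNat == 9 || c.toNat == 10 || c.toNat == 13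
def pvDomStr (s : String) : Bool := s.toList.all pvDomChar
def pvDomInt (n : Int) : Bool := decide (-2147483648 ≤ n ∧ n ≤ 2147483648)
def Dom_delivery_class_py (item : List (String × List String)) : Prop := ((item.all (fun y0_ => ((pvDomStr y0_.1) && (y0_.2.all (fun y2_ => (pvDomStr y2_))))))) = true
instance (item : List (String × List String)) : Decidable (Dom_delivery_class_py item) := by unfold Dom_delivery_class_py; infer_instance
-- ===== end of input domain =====

-- B replaces A's prioritized membership/any() scans by single-pass rank-minimization
-- (running minimum severity rank + a shrinking 'need' set); alternative algorithm, same cost.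

-- shared normalization: str(path).replace("\\", "/").lower()  (paths are typed str here, so str() is the identity)
def pvNormalize (p : String) : String := PySem.Str.lower (PySem.Str.replace p "\\" "/")

-- ===== PORT A =====
def delivery_class_py (item : List (String × List String)) : String :=
  let files : PySem.Set String :=
    PySem.Set.ofList (((List.lookup "files_changed" item).getD []).map pvNormalize)
  if PySem.Set.issubset (PySem.Set.ofList ["index.html", "src/app.js", "src/styles.css"]) files then
    "static_web_app"
  else if files.any (fun p => PySem.Str.startswith p "security/") then
    "security_or_complex_slice"
  else if files.any (fun p => PySem.Str.startswith p "tests/") then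
    "qa_validation"
  else if files.any (fun p => PySem.Str.startswith p "docs/") then
    "documented_delivery"
  else
    "general_delivery"

-- ===== PORT B =====
-- rank of one normalized path: the if/elif chain of Source B
def pvRank (q : String) : Int :=
  if PySem.Str.startswith q "security/" then 1
  else if PySem.Str.startswith q "tests/" then 2
  else if PySem.Str.startswith q "docs/" then 3
  else 4

def pvLabels : PySem.Dict Int String :=
  PySem.Dict.ofList [(1, "security_or_complex_slice"), (2, "qa_validation"), (3, "documented_delivery")]

def delivery_class_py_alt (item : List (String × List String)) : String :=
  let st := ((List.lookup "files_changed" item).getD []).foldl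
    (fun (st : Int × PySem.Set String) p =>
      let q := pvNormalize p
      (min st.1 (pvRank q), PySem.Set.discard st.2 q))
    (4, PySem.Set.ofList ["index.html", "src/app.js", "src/styles.css"])
  if st.2.isEmpty then "static_web_app"
  else PySem.Dict.getD pvLabels st.1 "general_delivery"

-- ===== PRECONDITION & SPEC =====
def Spec_delivery_class_py (item : List (String × List String)) (out : String) : Prop := out = delivery_class_py_alt item
instance (item : List (String × List String)) (out : String) : Decidable (Spec_delivery_class_py item out) := by unfold Spec_delivery_class_py; infer_instance

-- ===== CLAIM =====
def Claim_equal_delivery_class_py : Prop := ∀ (item : List (String × List String)), Dom_delivery_class_py item → Spec_delivery_class_py item (delivery_class_py item)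

-- ===== LEMMAS AND PROOFS =====

-- the pair fold splits into two independent folds
theorem pv_fold_split (l : List String) (b : Int) (s : PySem.Set String) :
    l.foldl
      (fun (st : Int × PySem.Set String) p =>
        let q := pvNormalize p
        (min st.1 (pvRank q), PySem.Set.discard st.2 q))
      (b, s)
    = (l.foldl (fun b p => min b (pvRank (pvNormalize p))) b,
       l.foldl (fun s p => PySem.Set.discard s (pvNormalize p)) s) := by
  induction l generalizing b s with
  | nil => rfl
  | cons x xs ih => simp [List.foldl_cons, ih]

-- A's priority chain over a list of paths, as a function
def pvChain (l : List String) : Int :=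
  if l.any (fun p => PySem.Str.startswith (pvNormalize p) "security/") then 1
  else if l.any (fun p => PySem.Str.startswith (pvNormalize p) "tests/") then 2
  else if l.any (fun p => PySem.Str.startswith (pvNormalize p) "docs/") then 3
  else 4

theorem pv_chain_le (l : List String) : pvChain l ≤ 4 := by
  unfold pvChain; split_ifs <;> omega

-- the chain value of x :: xs is the minimum of x's rank and xs's chain value
theorem pv_chain_cons (x : String) (xs : List String) :
    pvChain (x :: xs) = min (pvRank (pvNormalize x)) (pvChain xs) := by
  unfold pvChain pvRank
  simp only [List.any_cons]
  by_cases h1 : PySem.Str.startswith (pvNormalize x) "security/" = true <;>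
  by_cases h2 : PySem.Str.startswith (pvNormalize x) "tests/" = true <;>
  by_cases h3 : PySem.Str.startswith (pvNormalize x) "docs/" = true <;>
    simp only [Bool.not_eq_true] at h1 h2 h3 <;>
    simp only [h1, h2, h3, Bool.true_or, Bool.false_or] <;>
    split_ifs <;> first | decide | simp_all

-- the running minimum computes the chain value
theorem pv_best_aux (l : List String) (b : Int) (hb : b ≤ 4) :
    l.foldl (fun b p => min b (pvRank (pvNormalize p))) b = min b (pvChain l) := by
  induction l generalizing b with
  | nil => simp [pvChain]; omega
  | cons x xs ih =>
    rw [List.foldl_cons, ih _ (le_trans (min_le_left _ _) hb), pv_chain_cons, min_assoc]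

theorem pv_best (l : List String) :
    l.foldl (fun b p => min b (pvRank (pvNormalize p))) 4 = pvChain l := by
  rw [pv_best_aux l 4 le_rfl]
  exact min_eq_right (pv_chain_le l)

-- membership after repeatedly discarding the traversed (normalized) elements
theorem pv_mem_foldl_discard {α β : Type} [BEq α] [LawfulBEq α] (l : List β) (f : β → α)
    (s : PySem.Set α) (y : α) :
    y ∈ l.foldl (fun s p => PySem.Set.discard s (f p)) s ↔ y ∈ s ∧ y ∉ l.map f := by
  induction l generalizing s with
  | nil => simp
  | cons x xs ih =>
    simp only [List.foldl_cons, ih, PySem.Set.mem_discard, List.map_cons, List.mem_cons]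
    tauto

-- 'need' becomes empty iff the subset test of A succeeds
theorem pv_need (l : List String) :
    (l.foldl (fun s p => PySem.Set.discard s (pvNormalize p))
        (PySem.Set.ofList ["index.html", "src/app.js", "src/styles.css"])).isEmpty
    = PySem.Set.issubset (PySem.Set.ofList ["index.html", "src/app.js", "src/styles.css"])
        (PySem.Set.ofList (l.map pvNormalize)) := by
  rw [Bool.eq_iff_iff, List.isEmpty_iff, List.eq_nil_iff_forall_not_mem]
  simp only [pv_mem_foldl_discard, PySem.Set.issubset_iff, PySem.Set.mem_ofList, not_and, not_not]

-- any over set(l.map f) = any over l (composed with f)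
theorem pv_any_ofList_map (l : List String) (f : String → String) (g : String → Bool) :
    (PySem.Set.ofList (l.map f)).any g = l.any (fun p => g (f p)) := by
  rw [Bool.eq_iff_iff]
  simp [List.any_eq_true, PySem.Set.mem_ofList]

-- ===== VERDICT =====
theorem delivery_class_py_spec : Claim_equal_delivery_class_py := by
  intro item _
  unfold Spec_delivery_class_py delivery_class_py delivery_class_py_alt
  simp only [pv_fold_split, pv_best, pv_need, pv_any_ofList_map, pvChain]
  split_ifs <;> rfl
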